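-- pv_equiv track=rewrite | github.com/nelsonljs/Bigdata | final/Final (Submission)/02_cleaning.py | detectDairy
-- ===== SOURCE A (Python) =====
-- def detectDairy(li):
--     label = 1
--     dairy_list = ["cheese", "milk", "yoghurt", "cream"]
--     detect_list = []
--     for text in li:
--         if (text in dairy_list):
--             detect_list.append(text)
--     if (len(detect_list) == 0):
--         label = 0
--     return label
-- ===== SOURCE B (Python) =====
-- def detectDairy(li):
--     for word in ["cheese", "milk", "yoghurt", "cream"]:
--         if word in li:
--             return 1
--     return 0
-- ===== Notes on version B (the rewrite author's own statement) =====
-- stated objective: idiomatic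
-- what changed: B loops over the fixed 4-word dairy vocabulary and probes the input list for membership with early return, instead of scanning the whole input, accumulating matched words in a list and testing its length at the end.
import Mathlib
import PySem

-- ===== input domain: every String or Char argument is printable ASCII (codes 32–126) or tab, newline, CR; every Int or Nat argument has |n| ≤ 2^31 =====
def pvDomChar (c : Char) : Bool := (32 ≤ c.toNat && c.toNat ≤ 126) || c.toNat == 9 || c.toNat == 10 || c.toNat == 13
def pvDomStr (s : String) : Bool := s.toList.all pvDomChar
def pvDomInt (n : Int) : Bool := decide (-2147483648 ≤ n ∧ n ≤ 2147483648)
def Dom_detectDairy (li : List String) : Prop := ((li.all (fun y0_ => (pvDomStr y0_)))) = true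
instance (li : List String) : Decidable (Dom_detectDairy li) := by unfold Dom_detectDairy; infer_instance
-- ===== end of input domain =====

-- B loops over the fixed 4-word dairy vocabulary with an early return, probing the input list
-- for membership, instead of filtering the input against the vocabulary and testing the result's length.


-- ===== PORT A =====
def detectDairy (li : List String) : Int :=
  let label : Int := 1
  let dairy_list : List String := ["cheese", "milk", "yoghurt", "cream"]
  let detect_list : List String :=
    li.foldl (fun acc text => if dairy_list.contains text then acc ++ [text] else acc) []
  if detect_list.length = 0 then 0 else label

-- ===== PORT B =====
def detectDairyGo (li : List String) : List String → Int
  | [] => 0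
  | w :: ws => if li.contains w then 1 else detectDairyGo li ws

def detectDairy_alt (li : List String) : Int :=
  detectDairyGo li ["cheese", "milk", "yoghurt", "cream"]

-- ===== PRECONDITION & SPEC =====
def Spec_detectDairy (li : List String) (out : Int) : Prop := out = detectDairy_alt li
instance (li : List String) (out : Int) : Decidable (Spec_detectDairy li out) := by unfold Spec_detectDairy; infer_instance

-- ===== CLAIM (what is proved, stated in full; the proofs are below) =====
def Claim_equal_detectDairy : Prop := ∀ (li : List String), Dom_detectDairy li → Spec_detectDairy li (detectDairy li)

-- ===== LEMMAS AND PROOFS =====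

-- B's early-return loop over a vocabulary returns 1 iff some vocabulary word occurs in li.
theorem detectDairyGo_eq (li ws : List String) :
    detectDairyGo li ws = if ws.any li.contains then 1 else 0 := by
  induction ws with
  | nil => simp [detectDairyGo]
  | cons w ws ih =>
    simp only [detectDairyGo, List.any_cons, ih, Bool.or_eq_true, List.contains_eq_mem,
      decide_eq_true_eq]
    by_cases h : w ∈ li <;> simp [h]

-- ===== VERDICT (by name: the statement is the Claim_ definition above) =====
theorem detectDairy_spec : Claim_equal_detectDairy := by
  intro li _
  unfold Spec_detectDairy detectDairy detectDairy_alt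
  rw [detectDairyGo_eq]
  simp only [PySem.List.foldl_append_if_eq_filter, List.nil_append]
  simp only [List.length_eq_zero_iff, List.filter_eq_nil_iff, List.any_eq_true,
    List.contains_eq_mem, decide_eq_true_eq]
  by_cases h : ∃ x ∈ ["cheese", "milk", "yoghurt", "cream"], x ∈ li
  · obtain ⟨w, hw, hwl⟩ := h
    have h1 : ¬ ∀ a ∈ li, a ∉ ["cheese", "milk", "yoghurt", "cream"] :=
      fun hall => hall w hwl hw
    rw [if_neg h1, if_pos ⟨w, hw, hwl⟩]
  · have h1 : ∀ a ∈ li, a ∉ ["cheese", "milk", "yoghurt", "cream"] :=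
      fun a ha hd => h ⟨a, hd, ha⟩
    rw [if_pos h1, if_neg h]
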